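-- pv_equiv track=rewrite | github.com/meigo/slop-resolve | resolve_agent.py | _trim_api_reference
-- ===== SOURCE A (Python) =====
-- def _trim_api_reference(ref):
--     """Condense the API reference to just method signatures, removing setup instructions,
--     multi-line descriptions, deprecated sections, and other non-essential content."""
--     lines = ref.split("\n")
--     result = []
--     # Sections to skip entirely
--     skip_sections = {
--         "Using a script", "Prerequisites", "Overview",
--         "Running DaVinci Resolve in headless mode",
--         "Cloud Projects Settings", "Audio Sync Settings", "Audio Mapping",
--         "Auto Caption Settings", "Deprecated Resolve API Functions",
--         "Unsupported Resolve API Functions", "Unsupported exportType types",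
--         "ExportLUT notes", "List and Dict Data Structures",
--         "Keyframe Mode information", "Cache Mode information",
--         "Looking up Project and Clip properties",
--         "Looking up Render Settings",
--         "Looking up timeline export properties",
--         "Looking up Timeline item properties",
--     }
--     skip_until_next_section = False
--     in_api_section = False
--     for i, line in enumerate(lines):
--         stripped = line.strip()
--         # Detect section headers (text followed by a line of dashes)
--         if i + 1 < len(lines) and lines[i + 1].strip().startswith("---") and stripped:
--             if stripped in skip_sections or stripped.startswith("Last Updated"):
--                 skip_until_next_section = True
--                 continue
--             else:
--                 skip_until_next_section = False
--             if stripped == "DaVinci Resolve API":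
--                 in_api_section = True
--         if skip_until_next_section:
--             continue
--         if in_api_section:
--             # Keep: class headers (non-indented non-empty lines), method signatures (-->),
--             # and lines with important notes starting with #
--             if not stripped:
--                 continue
--             if stripped.startswith("---"):
--                 continue
--             is_class_header = not line.startswith(" ") and stripped and "-->" not in stripped
--             is_method_sig = "-->" in stripped
--             is_note = stripped.startswith("#") or stripped.startswith("*")
--             if is_class_header or is_method_sig:
--                 result.append(line)
--         else:
--             result.append(line)
--     return "\n".join(result)
-- ===== SOURCE B (Python) =====
-- def _trim_api_reference(ref):
--     """Condense the API reference to just method signatures: split the text once into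
--     sections (a header is a line underlined by dashes), then decide once per section
--     whether to drop it, keep it verbatim, or keep only class/method-signature lines."""
--     skip_sections = {
--         "Using a script", "Prerequisites", "Overview",
--         "Running DaVinci Resolve in headless mode",
--         "Cloud Projects Settings", "Audio Sync Settings", "Audio Mapping",
--         "Auto Caption Settings", "Deprecated Resolve API Functions",
--         "Unsupported Resolve API Functions", "Unsupported exportType types",
--         "ExportLUT notes", "List and Dict Data Structures",
--         "Keyframe Mode information", "Cache Mode information",
--         "Looking up Project and Clip properties",
--         "Looking up Render Settings",
--         "Looking up timeline export properties",
--         "Looking up Timeline item properties",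
--     }
--     lines = ref.split("\n")
--
--     # Phase 1: group the lines into a verbatim preamble plus (header, segment)
--     # groups; each segment includes its header line.
--     preamble = []
--     groups = []
--     cur = None
--     for i, line in enumerate(lines):
--         if i + 1 < len(lines) and lines[i + 1].strip().startswith("---") and line.strip():
--             if cur is not None:
--                 groups.append(cur)
--             cur = (line.strip(), [line])
--         elif cur is not None:
--             cur[1].append(line)
--         else:
--             preamble.append(line)
--     if cur is not None:
--         groups.append(cur)
--
--     def keep(ln):
--         # class headers (non-indented) and method signatures (-->); no blanks/dashes
--         s = ln.strip()
--         return bool(s) and not s.startswith("---") and ("-->" in s or not ln.startswith(" "))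
--
--     # Phase 2: one decision per group.
--     out = list(preamble)
--     in_api = False
--     for header, seg in groups:
--         if header == "DaVinci Resolve API":
--             in_api = True
--         if header in skip_sections or header.startswith("Last Updated"):
--             continue
--         if in_api:
--             out.extend(ln for ln in seg if keep(ln))
--         else:
--             out.extend(seg)
--     return "\n".join(out)
-- ===== Notes on version B (the rewrite author's own statement) =====
-- stated objective: alternative
-- what changed: A's single pass with mutable skip/in_api flags consumed mid-iteration is replaced by a two-phase decomposition: first group the lines into a preamble plus (header, segment) sections, then make one keep/drop/filter decision per section.
import Mathlib
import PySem

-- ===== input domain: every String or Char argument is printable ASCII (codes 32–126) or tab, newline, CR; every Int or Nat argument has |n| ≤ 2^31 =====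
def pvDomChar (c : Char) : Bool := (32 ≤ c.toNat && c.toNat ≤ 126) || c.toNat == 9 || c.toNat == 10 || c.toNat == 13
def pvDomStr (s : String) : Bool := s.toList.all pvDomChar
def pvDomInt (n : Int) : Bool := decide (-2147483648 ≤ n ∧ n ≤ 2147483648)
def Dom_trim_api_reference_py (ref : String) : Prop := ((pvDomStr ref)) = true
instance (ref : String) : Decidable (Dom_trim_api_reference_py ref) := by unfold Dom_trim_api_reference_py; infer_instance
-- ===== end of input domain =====

-- B re-decomposes A's one-pass state machine into section grouping + one decision per
-- section (objective: simpler/alternative decomposition; same asymptotic cost).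

-- shared helper: ref.split("\n") (split? is total here since the separator is non-empty)
def pvLines (ref : String) : List String := (PySem.Str.split? ref "\n").getD []

-- shared constant (the same literal set appears in both Python sources)
def pvSkipSections : List String :=
  ["Using a script", "Prerequisites", "Overview",
   "Running DaVinci Resolve in headless mode",
   "Cloud Projects Settings", "Audio Sync Settings", "Audio Mapping",
   "Auto Caption Settings", "Deprecated Resolve API Functions",
   "Unsupported Resolve API Functions", "Unsupported exportType types",
   "ExportLUT notes", "List and Dict Data Structures",
   "Keyframe Mode information", "Cache Mode information",
   "Looking up Project and Clip properties",
   "Looking up Render Settings",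
   "Looking up timeline export properties",
   "Looking up Timeline item properties"]

-- shared helper: the header test `i + 1 < len(lines) and lines[i+1].strip().startswith("---")
-- and line.strip()`, identical in both Python sources (peek at the next line replaces i+1)
def pvHdr (l : String) (rest : List String) : Bool :=
  match rest with
  | l2 :: _ => PySem.Str.startswith (PySem.Str.strip l2) "---" && !(PySem.Str.strip l == "")
  | [] => false

-- ===== PORT A =====
-- A's for-loop over (i, line) with mutable skip_until_next_section / in_api_section,
-- as structural recursion over the suffix (the two `continue`s become the flattened ifs;
-- the unused Python variable `is_note` is omitted).
def pvGoA : List String → Bool → Bool → List String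
  | [], _, _ => []
  | l :: rest, skip, api =>
    let s := PySem.Str.strip l
    if pvHdr l rest && (pvSkipSections.contains s || PySem.Str.startswith s "Last Updated") then
      pvGoA rest true api
    else
      let skip' := if pvHdr l rest then false else skip
      let api' := if pvHdr l rest && (s == "DaVinci Resolve API") then true else api
      if skip' then pvGoA rest skip' api'
      else if api' then
        if s == "" then pvGoA rest skip' api'
        else if PySem.Str.startswith s "---" then pvGoA rest skip' api'
        else
          let is_class_header := !(PySem.Str.startswith l " ") && !(s == "") && !(PySem.Str.isIn "-->" s)
          let is_method_sig := PySem.Str.isIn "-->" s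
          if is_class_header || is_method_sig then l :: pvGoA rest skip' api'
          else pvGoA rest skip' api'
      else l :: pvGoA rest skip' api'

def trim_api_reference_py (ref : String) : String :=
  PySem.Str.join "\n" (pvGoA (pvLines ref) false false)

-- ===== PORT B =====
-- phase 1 of Source B: one pass grouping lines into (preamble, [(header, segment)])
def pvSegGo : List String → List String → List (String × List String) →
    Option (String × List String) → List String × List (String × List String)
  | [], pre, segs, cur => (pre, segs ++ cur.toList)
  | l :: rest, pre, segs, cur =>
    if pvHdr l rest then
      pvSegGo rest pre (segs ++ cur.toList) (some (PySem.Str.strip l, [l]))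
    else
      match cur with
      | some (h, b) => pvSegGo rest pre segs (some (h, b ++ [l]))
      | none => pvSegGo rest (pre ++ [l]) segs none

-- Source B's `keep`
def pvKeepLine (ln : String) : Bool :=
  let s := PySem.Str.strip ln
  !(s == "") && !(PySem.Str.startswith s "---")
    && (PySem.Str.isIn "-->" s || !(PySem.Str.startswith ln " "))

-- phase 2 of Source B: one decision per group
def pvEmitGroups : List (String × List String) → Bool → List String
  | [], _ => []
  | (h, seg) :: gs, api =>
    let api' := if h == "DaVinci Resolve API" then true else api
    if pvSkipSections.contains h || PySem.Str.startswith h "Last Updated" then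
      pvEmitGroups gs api'
    else if api' then seg.filter pvKeepLine ++ pvEmitGroups gs api'
    else seg ++ pvEmitGroups gs api'

def trim_api_reference_py_alt (ref : String) : String :=
  let p := pvSegGo (pvLines ref) [] [] none
  PySem.Str.join "\n" (p.1 ++ pvEmitGroups p.2 false)

-- ===== PRECONDITION & SPEC =====
def Spec_trim_api_reference_py (ref : String) (out : String) : Prop := out = trim_api_reference_py_alt ref
instance (ref : String) (out : String) : Decidable (Spec_trim_api_reference_py ref out) := by unfold Spec_trim_api_reference_py; infer_instance

-- ===== CLAIM (what is proved, stated in full; the proofs are below) =====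
def Claim_equal_trim_api_reference_py : Prop := ∀ (ref : String), Dom_trim_api_reference_py ref → Spec_trim_api_reference_py ref (trim_api_reference_py ref)

-- ===== LEMMAS AND PROOFS =====

-- proof-side abbreviations for the per-header decisions
def pvSkipHdr (h : String) : Bool :=
  pvSkipSections.contains h || PySem.Str.startswith h "Last Updated"

def pvApi (api : Bool) (h : String) : Bool :=
  if h == "DaVinci Resolve API" then true else api

def pvEmitSeg (h : String) (seg : List String) (api : Bool) : List String :=
  if pvSkipHdr h then [] else if api then seg.filter pvKeepLine else seg

-- the accumulator-free description of phase 1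
def pvSegsIn : List String → String × List String → List (String × List String)
  | [], c => [c]
  | l :: rest, c =>
    if pvHdr l rest then c :: pvSegsIn rest (PySem.Str.strip l, [l])
    else pvSegsIn rest (c.1, c.2 ++ [l])

def pvPre : List String → List String
  | [] => []
  | l :: rest => if pvHdr l rest then [] else l :: pvPre rest

def pvSegs : List String → List (String × List String)
  | [] => []
  | l :: rest =>
    if pvHdr l rest then pvSegsIn rest (PySem.Str.strip l, [l]) else pvSegs rest

lemma pvSegGo_some (ls : List String) : ∀ (pre : List String) (segs : List (String × List String))
    (h : String) (b : List String),
    pvSegGo ls pre segs (some (h, b)) = (pre, segs ++ pvSegsIn ls (h, b)) := by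
  induction ls with
  | nil => intro pre segs h b; simp [pvSegGo, pvSegsIn]
  | cons l rest ih =>
    intro pre segs h b
    by_cases hh : pvHdr l rest = true
    · simp [pvSegGo, pvSegsIn, hh, ih]
    · simp only [Bool.not_eq_true] at hh
      simp [pvSegGo, pvSegsIn, hh, ih]

lemma pvSegGo_none (ls : List String) : ∀ (pre : List String) (segs : List (String × List String)),
    pvSegGo ls pre segs none = (pre ++ pvPre ls, segs ++ pvSegs ls) := by
  induction ls with
  | nil => intro pre segs; simp [pvSegGo, pvPre, pvSegs]
  | cons l rest ih =>
    intro pre segs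
    by_cases hh : pvHdr l rest = true
    · simp [pvSegGo, pvPre, pvSegs, hh, pvSegGo_some]
    · simp only [Bool.not_eq_true] at hh
      simp [pvSegGo, pvPre, pvSegs, hh, ih]

lemma pvEmitGroups_cons (h : String) (seg : List String) (gs : List (String × List String))
    (api : Bool) :
    pvEmitGroups ((h, seg) :: gs) api
      = pvEmitSeg h seg (pvApi api h) ++ pvEmitGroups gs (pvApi api h) := by
  simp only [pvEmitGroups, pvEmitSeg, pvApi, pvSkipHdr]
  split_ifs <;> simp

lemma pvSkipHdr_davinci : pvSkipHdr "DaVinci Resolve API" = false := by decide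

-- A at a header line
lemma pvGoA_hdr (l : String) (rest : List String) (skip api : Bool)
    (hh : pvHdr l rest = true) :
    pvGoA (l :: rest) skip api
      = pvEmitSeg (PySem.Str.strip l) [l] (pvApi api (PySem.Str.strip l))
        ++ pvGoA rest (pvSkipHdr (PySem.Str.strip l)) (pvApi api (PySem.Str.strip l)) := by
  have hs : (PySem.Str.strip l == "") = false := by
    unfold pvHdr at hh
    cases rest with
    | nil => exact absurd hh (by simp)
    | cons l2 _ =>
      rw [Bool.and_eq_true] at hh
      cases hb : (PySem.Str.strip l == "") with
      | false => rfl
      | true => rw [hb] at hh; exact absurd hh.2 (by simp)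
  have hda : ∀ (_ : (PySem.Str.strip l == "DaVinci Resolve API") = true),
      (pvSkipSections.contains (PySem.Str.strip l)
        || PySem.Str.startswith (PySem.Str.strip l) "Last Updated") = false := by
    intro hd
    rw [eq_of_beq hd]
    have h19 := pvSkipHdr_davinci
    unfold pvSkipHdr at h19
    exact h19
  simp only [pvGoA, pvEmitSeg, pvApi, pvSkipHdr, pvKeepLine, hh, Bool.true_and,
    List.filter_cons, List.filter_nil, hs, Bool.not_false, Bool.and_true]
  generalize hc : (pvSkipSections.contains (PySem.Str.strip l)
      || PySem.Str.startswith (PySem.Str.strip l) "Last Updated") = c at *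
  generalize hd : (PySem.Str.strip l == "DaVinci Resolve API") = d at *
  generalize h3 : PySem.Str.startswith (PySem.Str.strip l) "---" = e3 at *
  generalize hm : PySem.Str.isIn "-->" (PySem.Str.strip l) = m at *
  generalize hsp : PySem.Str.startswith l " " = sp at *
  cases c <;> cases d <;> cases e3 <;> cases m <;> cases sp <;> cases api <;>
    simp_all

-- A at a non-header line
lemma pvGoA_body (l : String) (rest : List String) (skip api : Bool)
    (hh : pvHdr l rest = false) :
    pvGoA (l :: rest) skip api
      = (if skip then [] else if api then List.filter pvKeepLine [l] else [l])
        ++ pvGoA rest skip api := by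
  simp only [pvGoA, pvKeepLine, hh, Bool.false_and,
    List.filter_cons, List.filter_nil]
  generalize (PySem.Str.strip l == "") = e0
  generalize PySem.Str.startswith (PySem.Str.strip l) "---" = e3
  generalize PySem.Str.isIn "-->" (PySem.Str.strip l) = m
  generalize PySem.Str.startswith l " " = sp
  cases skip <;> cases api <;> cases e0 <;> cases e3 <;> cases m <;> cases sp <;>
    simp

lemma pvEmitSeg_append_one (h : String) (b : List String) (l : String) (api : Bool) :
    pvEmitSeg h (b ++ [l]) api
      = pvEmitSeg h b api ++ (if pvSkipHdr h then [] else if api then List.filter pvKeepLine [l] else [l]) := by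
  unfold pvEmitSeg
  split_ifs <;> simp [List.filter_append]

-- main segment lemma: B's per-group emission equals A's loop inside the group
lemma pvmain (ls : List String) : ∀ (h : String) (b : List String) (api0 : Bool),
    pvEmitGroups (pvSegsIn ls (h, b)) api0
      = pvEmitSeg h b (pvApi api0 h) ++ pvGoA ls (pvSkipHdr h) (pvApi api0 h) := by
  induction ls with
  | nil => intro h b api0; simp [pvSegsIn, pvEmitGroups_cons, pvEmitGroups, pvGoA]
  | cons l rest ih =>
    intro h b api0
    by_cases hh : pvHdr l rest = true
    · rw [pvGoA_hdr l rest _ _ hh]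
      simp only [pvSegsIn, hh, if_true, pvEmitGroups_cons, ih]
    · simp only [Bool.not_eq_true] at hh
      simp only [pvSegsIn, hh, Bool.false_eq_true, if_false]
      rw [ih, pvGoA_body l rest _ _ hh, pvEmitSeg_append_one, List.append_assoc]

-- preamble lemma: the whole loop of A equals preamble + per-group emission
lemma pvtop (ls : List String) :
    pvGoA ls false false = pvPre ls ++ pvEmitGroups (pvSegs ls) false := by
  induction ls with
  | nil => simp [pvGoA, pvPre, pvSegs, pvEmitGroups]
  | cons l rest ih =>
    by_cases hh : pvHdr l rest = true
    · simp only [pvPre, pvSegs, hh, if_true, List.nil_append]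
      rw [pvmain rest (PySem.Str.strip l) [l] false, pvGoA_hdr l rest false false hh]
    · simp only [Bool.not_eq_true] at hh
      simp only [pvPre, pvSegs, hh, Bool.false_eq_true, if_false]
      rw [pvGoA_body l rest false false hh, ih]
      simp

-- ===== VERDICT (by name: the statement is the Claim_ definition above) =====
theorem trim_api_reference_py_spec : Claim_equal_trim_api_reference_py := by
  intro ref _
  unfold Spec_trim_api_reference_py trim_api_reference_py trim_api_reference_py_alt
  rw [pvSegGo_none]
  simp [pvtop]
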